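-- pv_equiv track=rewrite | github.com/mehulamish/Smart-Resume-Analyzer | Resume Analyzer working.py | predict_quality
-- ===== SOURCE A (Python) =====
-- from collections import Counter
--
-- def predict_quality(skills, quality_datasets):
--     quality_counts = Counter()
--     for skill in skills:
--         for quality, skillset in quality_datasets.items():
--             if skill.lower() in [s.lower() for s in skillset]:
--                 quality_counts[quality] += 1
--
--     # Filter qualities with a minimum count (e.g., 2)
--     qualities_found = {quality: count for quality, count in quality_counts.items() if count >= 2}
--
--     # Sort qualities by count in descending order
--     sorted_qualities = sorted(qualities_found, key=qualities_found.get, reverse=True)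
--
--     # Return the dictionary of qualities and skills
--     return qualities_found
-- ===== SOURCE B (Python) =====
-- from collections import Counter
--
-- def predict_quality(skills, quality_datasets):
--     # Inverted index: lowered skill -> [qualities whose skillset contains it], in dataset order.
--     index = {}
--     for quality, skillset in quality_datasets.items():
--         for s in dict.fromkeys(x.lower() for x in skillset):
--             index.setdefault(s, []).append(quality)
--     # One lookup per skill instead of rescanning every skillset.
--     hits = [q for skill in skills for q in index.get(skill.lower(), [])]
--     counts = Counter(hits)
--     return {quality: count for quality, count in counts.items() if count >= 2}
-- ===== Notes on version B (the rewrite author's own statement) =====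
-- stated objective: faster
-- what changed: B builds an inverted index (lowered skill -> matching qualities) from the datasets once and counts with one dictionary lookup per skill, instead of A's rescan and re-lowering of every skillset for every skill.
import Mathlib
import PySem

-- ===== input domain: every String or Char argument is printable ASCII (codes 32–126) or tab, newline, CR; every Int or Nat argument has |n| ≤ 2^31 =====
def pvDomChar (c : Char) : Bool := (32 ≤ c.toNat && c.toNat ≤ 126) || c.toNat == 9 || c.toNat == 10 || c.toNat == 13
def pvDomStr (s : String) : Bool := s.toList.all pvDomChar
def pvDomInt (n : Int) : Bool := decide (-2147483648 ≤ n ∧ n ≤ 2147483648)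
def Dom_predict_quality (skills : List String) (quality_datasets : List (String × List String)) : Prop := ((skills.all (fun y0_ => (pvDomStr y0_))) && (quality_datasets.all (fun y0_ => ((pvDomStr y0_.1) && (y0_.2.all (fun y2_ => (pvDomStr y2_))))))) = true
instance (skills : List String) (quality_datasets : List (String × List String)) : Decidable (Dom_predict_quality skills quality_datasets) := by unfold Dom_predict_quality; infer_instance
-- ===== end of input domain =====

-- B replaces A's rescan of every lowered skillset for every skill with an inverted index
-- (lowered skill -> matching qualities) built once, then one dictionary lookup per skill.

-- ===== PORT A =====
def predict_quality (skills : List String) (quality_datasets : List (String × List String)) : List (String × Int) :=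
  -- quality_counts = Counter(); for skill in skills: for quality, skillset in items: if ...: counter[quality] += 1
  let quality_counts : PySem.Dict String Int :=
    skills.foldl (fun d skill =>
      quality_datasets.foldl (fun d p =>
        if PySem.Str.lower skill ∈ p.2.map PySem.Str.lower then
          d.modify p.1 0 (· + 1)
        else d) d)
      PySem.Dict.empty
  -- qualities_found = {quality: count for quality, count in quality_counts.items() if count >= 2}
  let qualities_found : PySem.Dict String Int :=
    (quality_counts.items.filter (fun p => decide (2 ≤ p.2))).foldl
      (fun d p => d.insert p.1 p.2) PySem.Dict.empty
  -- sorted_qualities = sorted(qualities_found, key=qualities_found.get, reverse=True)  (computed, unused;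
  -- the key .get always hits an existing key here, so getD 0 is exact)
  let _sorted_qualities :=
    PySem.List.sorted qualities_found.keys (fun q => qualities_found.getD q 0) true
  qualities_found.items

-- ===== PORT B =====
def predict_quality_alt (skills : List String) (quality_datasets : List (String × List String)) : List (String × Int) :=
  -- index = {}; for quality, skillset in items: for s in dict.fromkeys(lowered skillset): index.setdefault(s, []).append(quality)
  let index : PySem.Dict String (List String) :=
    quality_datasets.foldl (fun d p =>
      (PySem.List.dedup (p.2.map PySem.Str.lower)).foldl
        (fun d s => d.modify s [] (· ++ [p.1])) d)
      PySem.Dict.empty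
  -- hits = [q for skill in skills for q in index.get(skill.lower(), [])]
  let hits : List String :=
    skills.foldl (fun acc skill => acc ++ index.getD (PySem.Str.lower skill) []) []
  -- counts = Counter(hits)
  let counts : PySem.Dict String Int := PySem.Dict.counter hits
  -- {quality: count for quality, count in counts.items() if count >= 2}
  let qualities_found : PySem.Dict String Int :=
    (counts.items.filter (fun p => decide (2 ≤ p.2))).foldl
      (fun d p => d.insert p.1 p.2) PySem.Dict.empty
  qualities_found.items

-- ===== PRECONDITION & SPEC =====
def Spec_predict_quality (skills : List String) (quality_datasets : List (String × List String)) (out : List (String × Int)) : Prop := out = predict_quality_alt skills quality_datasets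
instance (skills : List String) (quality_datasets : List (String × List String)) (out : List (String × Int)) : Decidable (Spec_predict_quality skills quality_datasets out) := by unfold Spec_predict_quality; infer_instance

-- ===== CLAIM (what is proved, stated in full; the proofs are below) =====
def Claim_equal_predict_quality : Prop := ∀ (skills : List String) (quality_datasets : List (String × List String)), Dom_predict_quality skills quality_datasets → Spec_predict_quality skills quality_datasets (predict_quality skills quality_datasets)

-- ===== LEMMAS AND PROOFS =====

-- the qualities whose lowered skillset contains the lowered skill, in dataset order
def pvHit (quality_datasets : List (String × List String)) (c : String) : List String :=
  ((quality_datasets.filter (fun p => decide (c ∈ p.2.map PySem.Str.lower))).map (fun p => p.1))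

-- a Nodup list filtered down to one value
theorem pv_filter_beq_of_nodup {α : Type} [DecidableEq α] (l : List α) (hnd : l.Nodup) (c : α) :
    l.filter (fun s => s == c) = if c ∈ l then [c] else [] := by
  induction l with
  | nil => simp
  | cons x xs ih =>
    rcases List.nodup_cons.mp hnd with ⟨hx, hnd'⟩
    by_cases hxc : x = c
    · subst hxc
      simp [hx, ih hnd']
    · simp [hxc, ih hnd', Ne.symm hxc]

-- B's inverted index looked up at c returns exactly pvHit
-- the pair stream filtered at key c projects to pvHit
theorem pv_hit_stream (quality_datasets : List (String × List String)) (c : String) :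
    ((quality_datasets.flatMap
        (fun p => (PySem.List.dedup (p.2.map PySem.Str.lower)).map (fun s => (s, p.1)))).filter
        (fun pr => pr.1 == c)).map (fun x => x.2)
      = pvHit quality_datasets c := by
  unfold pvHit
  induction quality_datasets with
  | nil => simp
  | cons p qs ih =>
    have hblock : (((PySem.List.dedup (p.2.map PySem.Str.lower)).map (fun s => (s, p.1))).filter
          (fun pr => pr.1 == c)).map (fun x => x.2)
        = if c ∈ p.2.map PySem.Str.lower then [p.1] else [] := by
      rw [List.filter_map]
      have h1 : ((fun pr => pr.1 == c) ∘ (fun s => (s, p.1))) = (fun s => s == c) := rfl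
      rw [h1, pv_filter_beq_of_nodup _ (PySem.List.nodup_dedup _) c]
      by_cases hc : c ∈ p.2.map PySem.Str.lower
      · simp [hc]
      · have : c ∉ PySem.List.dedup (p.2.map PySem.Str.lower) := by
          simpa [PySem.List.mem_dedup] using hc
        simp [hc]
    simp only [List.flatMap_cons, List.filter_append, List.map_append, ih, hblock,
      List.filter_cons]
    by_cases hc : c ∈ p.2.map PySem.Str.lower <;> simp [hc]

-- B's inverted index looked up at c returns exactly pvHit
theorem pv_index_getD (quality_datasets : List (String × List String)) (c : String) :
    (quality_datasets.foldl (fun d p =>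
        (PySem.List.dedup (p.2.map PySem.Str.lower)).foldl
          (fun d s => d.modify s [] (· ++ [p.1])) d)
        PySem.Dict.empty).getD c []
      = pvHit quality_datasets c := by
  have hflat : (quality_datasets.foldl (fun d p =>
        (PySem.List.dedup (p.2.map PySem.Str.lower)).foldl
          (fun d s => d.modify s [] (· ++ [p.1])) d)
        PySem.Dict.empty)
      = (quality_datasets.flatMap
          (fun p => (PySem.List.dedup (p.2.map PySem.Str.lower)).map (fun s => (s, p.1)))).foldl
          (fun d pr => d.modify pr.1 [] (· ++ [pr.2])) PySem.Dict.empty := by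
    rw [List.foldl_flatMap]
    exact PySem.List.foldl_congr_mem _ _ _ _ (fun acc x _ => by rw [List.foldl_map])
  rw [hflat, PySem.Dict.getD_foldl_modify_append, PySem.Dict.getD_empty, List.nil_append,
    pv_hit_stream]

-- A's inner loop over the datasets is the counter fold over pvHit of the current skill
theorem pv_inner_loop (quality_datasets : List (String × List String)) (skill : String)
    (d : PySem.Dict String Int) :
    quality_datasets.foldl (fun d p =>
        if PySem.Str.lower skill ∈ p.2.map PySem.Str.lower then d.modify p.1 0 (· + 1) else d) d
      = (pvHit quality_datasets (PySem.Str.lower skill)).foldl (fun d q => d.modify q 0 (· + 1)) d := by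
  unfold pvHit
  rw [List.foldl_map, List.foldl_filter]
  exact PySem.List.foldl_congr_mem _ _ _ _ (fun acc x _ => by by_cases h : PySem.Str.lower skill ∈ x.2.map PySem.Str.lower <;> simp [h])

-- A's counter equals the Counter of B's hit stream
theorem pv_counter_eq (skills : List String) (quality_datasets : List (String × List String)) :
    skills.foldl (fun d skill =>
        quality_datasets.foldl (fun d p =>
          if PySem.Str.lower skill ∈ p.2.map PySem.Str.lower then d.modify p.1 0 (· + 1) else d) d)
        PySem.Dict.empty
      = PySem.Dict.counter (skills.flatMap (fun skill => pvHit quality_datasets (PySem.Str.lower skill))) := by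
  rw [PySem.Dict.counter_eq_foldl, List.foldl_flatMap]
  exact PySem.List.foldl_congr_mem _ _ _ _ (fun acc x _ => pv_inner_loop quality_datasets x acc)

-- ===== VERDICT (by name: the statement is the Claim_ definition above) =====
theorem predict_quality_spec : Claim_equal_predict_quality := by
  intro skills quality_datasets _
  unfold Spec_predict_quality predict_quality predict_quality_alt
  have hhits : skills.foldl (fun acc skill =>
        acc ++ (quality_datasets.foldl (fun d p =>
          (PySem.List.dedup (p.2.map PySem.Str.lower)).foldl
            (fun d s => d.modify s [] (· ++ [p.1])) d)
          PySem.Dict.empty).getD (PySem.Str.lower skill) []) []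
      = skills.flatMap (fun skill => pvHit quality_datasets (PySem.Str.lower skill)) := by
    rw [show (skills.flatMap (fun skill => pvHit quality_datasets (PySem.Str.lower skill)))
        = [] ++ skills.flatMap (fun skill => pvHit quality_datasets (PySem.Str.lower skill)) from rfl,
      ← PySem.List.foldl_append_eq_flatMap]
    exact PySem.List.foldl_congr_mem _ _ _ _ (fun acc x _ => by rw [pv_index_getD])
  simp only [hhits, pv_counter_eq]
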